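-- pv_equiv track=rewrite | github.com/Hyeri-hci/ODOCAIagent | backend/agents/supervisor/intent_parser.py | _match_by_hint
-- ===== SOURCE A (Python) =====
-- from typing import Any, Dict, List, Literal, Optional, Tuple
--
-- def _match_by_hint(hint: str, repos: List[str]) -> Optional[str]:
--     """repo_hint를 기반으로 캐시에서 레포 찾기."""
--     hint_lower = hint.lower().strip()
--
--     # 정확히 일치
--     for repo in repos:
--         if hint_lower == repo.lower():
--             return repo
--
--     # 레포 이름만 일치 (owner 무시)
--     for repo in repos:
--         parts = repo.split("/")
--         if len(parts) >= 2:
--             repo_name = parts[-1].lower()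
--             if hint_lower == repo_name:
--                 return repo
--
--     # 부분 일치 (hint가 repo 이름에 포함)
--     for repo in repos:
--         if hint_lower in repo.lower():
--             return repo
--
--     # 레포 이름이 hint에 포함
--     for repo in repos:
--         parts = repo.split("/")
--         if len(parts) >= 2:
--             repo_name = parts[-1].lower()
--             if repo_name in hint_lower:
--                 return repo
--
--     return None
-- ===== SOURCE B (Python) =====
-- from typing import List, Optional
--
-- def _match_by_hint(hint: str, repos: List[str]) -> Optional[str]:
--     """Single pass: compute each repo's best tier, keep the first repo with the
--     smallest tier, short-circuit on an exact (tier-1) match."""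
--     hint_lower = hint.lower().strip()
--     best = None  # (tier, repo), first-seen repo wins ties
--     for repo in repos:
--         repo_lower = repo.lower()
--         if hint_lower == repo_lower:
--             return repo
--         parts = repo.split("/")
--         name = parts[-1].lower() if len(parts) >= 2 else None
--         if name is not None and hint_lower == name:
--             tier = 2
--         elif hint_lower in repo_lower:
--             tier = 3
--         elif name is not None and name in hint_lower:
--             tier = 4
--         else:
--             continue
--         if best is None or tier < best[0]:
--             best = (tier, repo)
--     return best[1] if best is not None else None
-- ===== Notes on version B (the rewrite author's own statement) =====
-- stated objective: alternative
-- what changed: Replaces A's four sequential full scans (one per match tier) by a single pass that computes each repo's best tier, tracks the first repo with the minimal tier, and short-circuits on an exact match.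
import Mathlib
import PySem

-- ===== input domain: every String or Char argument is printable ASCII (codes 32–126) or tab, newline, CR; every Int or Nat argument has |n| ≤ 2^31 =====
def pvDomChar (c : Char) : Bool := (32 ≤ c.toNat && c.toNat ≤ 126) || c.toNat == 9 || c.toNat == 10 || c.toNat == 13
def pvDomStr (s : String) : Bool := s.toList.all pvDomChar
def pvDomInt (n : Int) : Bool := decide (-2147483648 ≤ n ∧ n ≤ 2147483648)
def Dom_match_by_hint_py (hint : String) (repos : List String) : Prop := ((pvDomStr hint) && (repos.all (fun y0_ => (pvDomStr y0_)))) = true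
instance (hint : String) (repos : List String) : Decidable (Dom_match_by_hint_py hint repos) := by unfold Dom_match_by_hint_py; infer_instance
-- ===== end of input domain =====

-- B replaces A's four sequential tier scans by one pass tracking the first repo of minimal tier (objective: alternative decomposition, same cost class).

-- ===== PORT A =====
-- tier predicates shared with B (helpers stay helpers; the loop structures differ)
def pvT1 (hl repo : String) : Bool := hl == PySem.Str.lower repo

def pvT2 (hl repo : String) : Bool :=
  let parts := (PySem.Str.split? repo "/").getD []
  decide (2 ≤ parts.length) &&
    (match PySem.List.pyGet? parts (-1) with
     | some lastPart => hl == PySem.Str.lower lastPart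
     | none => false)

def pvT3 (hl repo : String) : Bool := PySem.Str.isIn hl (PySem.Str.lower repo)

def pvT4 (hl repo : String) : Bool :=
  let parts := (PySem.Str.split? repo "/").getD []
  decide (2 ≤ parts.length) &&
    (match PySem.List.pyGet? parts (-1) with
     | some lastPart => PySem.Str.isIn (PySem.Str.lower lastPart) hl
     | none => false)

-- A: four sequential for-loops, each returning the first match
def match_by_hint_py (hint : String) (repos : List String) : Option String :=
  let hl := PySem.Str.strip (PySem.Str.lower hint)
  match repos.find? (fun repo => pvT1 hl repo) with
  | some r => some r
  | none =>
    match repos.find? (fun repo => pvT2 hl repo) with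
    | some r => some r
    | none =>
      match repos.find? (fun repo => pvT3 hl repo) with
      | some r => some r
      | none => repos.find? (fun repo => pvT4 hl repo)

-- ===== PORT B =====
-- best tier (2, 3 or 4) a non-exactly-matching repo achieves, if any
def pvTierOf (hl repo : String) : Option Nat :=
  if pvT2 hl repo then some 2
  else if pvT3 hl repo then some 3
  else if pvT4 hl repo then some 4
  else none

def pvUpd (hl : String) (best : Option (Nat × String)) (repo : String) : Option (Nat × String) :=
  match pvTierOf hl repo with
  | none => best
  | some t =>
    match best with
    | none => some (t, repo)
    | some (bt, br) => if t < bt then some (t, repo) else some (bt, br)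

-- single pass with accumulator; early return on an exact match
def pvLoopB (hl : String) : List String → Option (Nat × String) → Option String
  | [], best => best.map (·.2)
  | repo :: rest, best =>
    if pvT1 hl repo then some repo
    else pvLoopB hl rest (pvUpd hl best repo)

def match_by_hint_py_alt (hint : String) (repos : List String) : Option String :=
  pvLoopB (PySem.Str.strip (PySem.Str.lower hint)) repos none

-- ===== PRECONDITION & SPEC =====
def Spec_match_by_hint_py (hint : String) (repos : List String) (out : Option String) : Prop := out = match_by_hint_py_alt hint repos
instance (hint : String) (repos : List String) (out : Option String) : Decidable (Spec_match_by_hint_py hint repos out) := by unfold Spec_match_by_hint_py; infer_instance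

-- ===== CLAIM (what is proved, stated in full; the proofs are below) =====
def Claim_equal_match_by_hint_py : Prop := ∀ (hint : String) (repos : List String), Dom_match_by_hint_py hint repos → Spec_match_by_hint_py hint repos (match_by_hint_py hint repos)

-- ===== LEMMAS AND PROOFS =====

-- what the accumulator means: the answer once the remaining list l is merged with a best-so-far acc
def pvMerge (hl : String) (acc : Option (Nat × String)) (l : List String) : Option String :=
  match acc with
  | none =>
    match l.find? (fun r => pvT2 hl r) with
    | some r => some r
    | none =>
      match l.find? (fun r => pvT3 hl r) with
      | some r => some r
      | none => l.find? (fun r => pvT4 hl r)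
  | some (bt, br) =>
    if bt ≤ 2 then some br
    else
      match l.find? (fun r => pvT2 hl r) with
      | some r => some r
      | none =>
        if bt ≤ 3 then some br
        else
          match l.find? (fun r => pvT3 hl r) with
          | some r => some r
          | none => some br

lemma pvMerge_nil (hl : String) (acc : Option (Nat × String)) :
    pvMerge hl acc [] = acc.map (·.2) := by
  rcases acc with _ | ⟨bt, br⟩
  · rfl
  · simp only [pvMerge, List.find?_nil, Option.map_some]
    split_ifs <;> rfl

lemma pvTierOf_le (hl r : String) : ∀ t ∈ pvTierOf hl r, t ≤ 4 := by
  intro t ht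
  unfold pvTierOf at ht
  split_ifs at ht <;> simp_all <;> omega

lemma pvUpd_le (hl : String) (acc : Option (Nat × String)) (r : String)
    (hacc : ∀ p ∈ acc, p.1 ≤ 4) : ∀ p ∈ pvUpd hl acc r, p.1 ≤ 4 := by
  intro p hp
  unfold pvUpd at hp
  cases htier : pvTierOf hl r with
  | none => rw [htier] at hp; exact hacc p hp
  | some t =>
    rw [htier] at hp
    have ht := pvTierOf_le hl r t htier
    rcases acc with _ | ⟨bt, br⟩
    · simp only [Option.mem_def, Option.some.injEq] at hp; subst hp; exact ht
    · have hb := hacc (bt, br) rfl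
      by_cases h : t < bt
      · simp only [h, if_true, Option.mem_def, Option.some.injEq] at hp; subst hp; exact ht
      · simp only [h, if_false, Option.mem_def, Option.some.injEq] at hp; subst hp; exact hb

lemma pvMerge_cons (hl : String) (acc : Option (Nat × String)) (r : String) (l : List String)
    (hacc : ∀ p ∈ acc, p.1 ≤ 4) :
    pvMerge hl acc (r :: l) = pvMerge hl (pvUpd hl acc r) l := by
  rcases acc with _ | ⟨bt, br⟩
  · by_cases h2 : pvT2 hl r <;> by_cases h3 : pvT3 hl r <;> by_cases h4 : pvT4 hl r <;>
      simp only [pvMerge, pvUpd, pvTierOf, List.find?_cons, h2, h3, h4, if_true, if_false,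
        Bool.false_eq_true] <;>
      (try split_ifs) <;> (try simp only [pvMerge]) <;> (try split_ifs) <;> first | rfl | omega
  · have hb := hacc (bt, br) rfl
    by_cases h2 : pvT2 hl r <;> by_cases h3 : pvT3 hl r <;> by_cases h4 : pvT4 hl r <;>
      simp only [pvMerge, pvUpd, pvTierOf, List.find?_cons, h2, h3, h4, if_true, if_false,
        Bool.false_eq_true] <;>
      (try split_ifs) <;> (try simp only [pvMerge]) <;> (try split_ifs) <;> first | rfl | omega

lemma pvLoopB_eq (hl : String) (l : List String) (acc : Option (Nat × String))
    (hacc : ∀ p ∈ acc, p.1 ≤ 4) :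
    pvLoopB hl l acc =
      match l.find? (fun r => pvT1 hl r) with
      | some r => some r
      | none => pvMerge hl acc l := by
  induction l generalizing acc with
  | nil => simp [pvLoopB, pvMerge_nil]
  | cons r rest ih =>
    by_cases h1 : pvT1 hl r
    · simp [pvLoopB, h1]
    · simp only [pvLoopB, h1, if_false, List.find?_cons, Bool.false_eq_true]
      rw [ih _ (pvUpd_le hl acc r hacc), pvMerge_cons hl acc r rest hacc]

-- ===== VERDICT (by name: the statement is the Claim_ definition above) =====
theorem match_by_hint_py_spec : Claim_equal_match_by_hint_py := by
  intro hint repos _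
  show match_by_hint_py hint repos = match_by_hint_py_alt hint repos
  unfold match_by_hint_py match_by_hint_py_alt
  rw [pvLoopB_eq _ _ none (by simp)]
  rfl
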